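-- pv_equiv track=rewrite | github.com/minyoung62/Algorithm-Study | 백준/Bronze/15953. 상금 헌터/상금 헌터.py | getOne
-- ===== SOURCE A (Python) =====
-- def getOne(a):
--   rank = 1
--   moneys = [0,500,300,200,50,30,10]
--   for i in range(1, 7):
--     for j in range(1,i+1):
--       if rank == a:
--         return moneys[i]
--       rank += 1
--
--   return 0
-- ===== SOURCE B (Python) =====
-- _PRIZES = {1: 500, 2: 300, 3: 300, 4: 200, 5: 200, 6: 200,
--            7: 50, 8: 50, 9: 50, 10: 50,
--            11: 30, 12: 30, 13: 30, 14: 30, 15: 30,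
--            16: 10, 17: 10, 18: 10, 19: 10, 20: 10, 21: 10}
--
-- def getOne(a):
--   return _PRIZES.get(a, 0)
-- ===== Notes on version B (the rewrite author's own statement) =====
-- stated objective: simpler
-- what changed: Replaced the nested rank-counting loops with a single precomputed rank-to-prize table lookup with default 0.
import Mathlib
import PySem

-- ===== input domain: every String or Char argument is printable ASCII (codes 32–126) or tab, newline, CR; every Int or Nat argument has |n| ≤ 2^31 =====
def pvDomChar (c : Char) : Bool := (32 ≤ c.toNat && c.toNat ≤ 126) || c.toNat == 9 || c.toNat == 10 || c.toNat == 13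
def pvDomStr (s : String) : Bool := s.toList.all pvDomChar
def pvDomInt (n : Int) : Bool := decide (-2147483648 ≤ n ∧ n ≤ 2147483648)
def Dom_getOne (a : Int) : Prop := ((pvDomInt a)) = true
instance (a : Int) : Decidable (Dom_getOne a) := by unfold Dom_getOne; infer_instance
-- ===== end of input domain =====

-- B replaces the nested rank-counting loops with a precomputed rank->prize table lookup (objective: simpler).
-- ===== PORT A =====
-- literal port of A: inner loop 'for j in range(1,i+1)' (early return = .error, loop exit = .ok rank)
def getOneInner (a m : Int) (js : List Int) (rank : Int) : Except Int Int :=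
  match js with
  | [] => .ok rank
  | _ :: js' => if rank == a then .error m else getOneInner a m js' (rank + 1)

-- outer loop 'for i in range(1,7)'; falls through to 'return 0'
def getOneOuter (a : Int) (moneys : List Int) (is_ : List Int) (rank : Int) : Int :=
  match is_ with
  | [] => 0
  | i :: is' =>
    match getOneInner a ((PySem.List.pyGet? moneys i).getD 0) (PySem.List.pyRange 1 (i+1) 1) rank with
    | .error m => m          -- 'return moneys[i]'; i is always in range 1..6
    | .ok r => getOneOuter a moneys is' r

def getOne (a : Int) : Int :=
  getOneOuter a [0,500,300,200,50,30,10] (PySem.List.pyRange 1 7 1) 1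

-- ===== PORT B =====
def prizeTable : PySem.Dict Int Int :=
  PySem.Dict.ofList [(1,500),(2,300),(3,300),(4,200),(5,200),(6,200),
    (7,50),(8,50),(9,50),(10,50),
    (11,30),(12,30),(13,30),(14,30),(15,30),
    (16,10),(17,10),(18,10),(19,10),(20,10),(21,10)]

def getOne_alt (a : Int) : Int := PySem.Dict.getD prizeTable a 0

-- ===== PRECONDITION & SPEC =====
def Spec_getOne (a : Int) (out : Int) : Prop := out = getOne_alt a
instance (a : Int) (out : Int) : Decidable (Spec_getOne a out) := by unfold Spec_getOne; infer_instance

-- ===== CLAIM (what is proved, stated in full; the proofs are below) =====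
def Claim_equal_getOne : Prop := ∀ (a : Int), Dom_getOne a → Spec_getOne a (getOne a)

-- ===== LEMMAS AND PROOFS =====

-- ===== VERDICT (by name: the statement is the Claim_ definition above) =====
theorem pr_outer : PySem.List.pyRange 1 7 1 = [1,2,3,4,5,6] := by decide
theorem pr_1 : PySem.List.pyRange 1 (1+1) 1 = [1] := by decide
theorem pr_2 : PySem.List.pyRange 1 (2+1) 1 = [1, 2] := by decide
theorem pr_3 : PySem.List.pyRange 1 (3+1) 1 = [1, 2, 3] := by decide
theorem pr_4 : PySem.List.pyRange 1 (4+1) 1 = [1, 2, 3, 4] := by decide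
theorem pr_5 : PySem.List.pyRange 1 (5+1) 1 = [1, 2, 3, 4, 5] := by decide
theorem pr_6 : PySem.List.pyRange 1 (6+1) 1 = [1, 2, 3, 4, 5, 6] := by decide

theorem getOne_spec : Claim_equal_getOne := by
  intro a _
  show getOne a = getOne_alt a
  by_cases h : 1 ≤ a ∧ a ≤ 21
  · obtain ⟨h1, h2⟩ := h
    interval_cases a <;> decide
  · have ep1 : ((1:Int) = a) = False := by apply eq_false; omega
    have ep2 : ((2:Int) = a) = False := by apply eq_false; omega
    have ep3 : ((3:Int) = a) = False := by apply eq_false; omega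
    have ep4 : ((4:Int) = a) = False := by apply eq_false; omega
    have ep5 : ((5:Int) = a) = False := by apply eq_false; omega
    have ep6 : ((6:Int) = a) = False := by apply eq_false; omega
    have ep7 : ((7:Int) = a) = False := by apply eq_false; omega
    have ep8 : ((8:Int) = a) = False := by apply eq_false; omega
    have ep9 : ((9:Int) = a) = False := by apply eq_false; omega
    have ep10 : ((10:Int) = a) = False := by apply eq_false; omega
    have ep11 : ((11:Int) = a) = False := by apply eq_false; omega
    have ep12 : ((12:Int) = a) = False := by apply eq_false; omega
    have ep13 : ((13:Int) = a) = False := by apply eq_false; omega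
    have ep14 : ((14:Int) = a) = False := by apply eq_false; omega
    have ep15 : ((15:Int) = a) = False := by apply eq_false; omega
    have ep16 : ((16:Int) = a) = False := by apply eq_false; omega
    have ep17 : ((17:Int) = a) = False := by apply eq_false; omega
    have ep18 : ((18:Int) = a) = False := by apply eq_false; omega
    have ep19 : ((19:Int) = a) = False := by apply eq_false; omega
    have ep20 : ((20:Int) = a) = False := by apply eq_false; omega
    have ep21 : ((21:Int) = a) = False := by apply eq_false; omega
    have eb1 : ((1:Int) == a) = false := by simp [ep1]
    have eb2 : ((2:Int) == a) = false := by simp [ep2]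
    have eb3 : ((3:Int) == a) = false := by simp [ep3]
    have eb4 : ((4:Int) == a) = false := by simp [ep4]
    have eb5 : ((5:Int) == a) = false := by simp [ep5]
    have eb6 : ((6:Int) == a) = false := by simp [ep6]
    have eb7 : ((7:Int) == a) = false := by simp [ep7]
    have eb8 : ((8:Int) == a) = false := by simp [ep8]
    have eb9 : ((9:Int) == a) = false := by simp [ep9]
    have eb10 : ((10:Int) == a) = false := by simp [ep10]
    have eb11 : ((11:Int) == a) = false := by simp [ep11]
    have eb12 : ((12:Int) == a) = false := by simp [ep12]
    have eb13 : ((13:Int) == a) = false := by simp [ep13]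
    have eb14 : ((14:Int) == a) = false := by simp [ep14]
    have eb15 : ((15:Int) == a) = false := by simp [ep15]
    have eb16 : ((16:Int) == a) = false := by simp [ep16]
    have eb17 : ((17:Int) == a) = false := by simp [ep17]
    have eb18 : ((18:Int) == a) = false := by simp [ep18]
    have eb19 : ((19:Int) == a) = false := by simp [ep19]
    have eb20 : ((20:Int) == a) = false := by simp [ep20]
    have eb21 : ((21:Int) == a) = false := by simp [ep21]
    have hit : prizeTable.items =
      [(1,500),(2,300),(3,300),(4,200),(5,200),(6,200),(7,50),(8,50),(9,50),(10,50),
       (11,30),(12,30),(13,30),(14,30),(15,30),(16,10),(17,10),(18,10),(19,10),(20,10),(21,10)] := by decide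
    simp only [getOne, getOneOuter, getOneInner, getOne_alt,
      PySem.Dict.getD, PySem.Dict.get?, hit, pr_outer,
      pr_1, pr_2, pr_3, pr_4, pr_5, pr_6]
    norm_num [List.find?, ep1, ep2, ep3, ep4, ep5, ep6, ep7, ep8, ep9, ep10, ep11, ep12, ep13, ep14, ep15, ep16, ep17, ep18, ep19, ep20, ep21, eb1, eb2, eb3, eb4, eb5, eb6, eb7, eb8, eb9, eb10, eb11, eb12, eb13, eb14, eb15, eb16, eb17, eb18, eb19, eb20, eb21]
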